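-- pv_equiv track=rewrite | github.com/theGolyo/aoc2021 | 3/B.py | filterListCOSR
-- ===== SOURCE A (Python) =====
-- def filterListCOSR(list, index):
--     if (len(list) == 1):
--         return list
--     zeroList = []
--     oneList = []
--     for pos in list:
--         bit = pos & (1 << index)
--         if bit == 0:
--             zeroList.append(pos)
--         else:
--             oneList.append(pos)
--     if len(oneList) < len(zeroList):
--         return oneList
--     return zeroList
-- ===== SOURCE B (Python) =====
-- def filterListCOSR(list, index):
--     if len(list) <= 1:
--         return list
--     mask = 1 << index
--     ones = sum(1 for pos in list if pos & mask)
--     targetOne = 2 * ones < len(list)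
--     return [pos for pos in list if bool(pos & mask) == targetOne]
-- ===== Notes on version B (the rewrite author's own statement) =====
-- stated objective: alternative
-- what changed: Replaces the simultaneous build of two partition lists with a counting pass that decides the target bit value (2*ones < n reproduces the strict smaller-group/tie-to-zeros rule) followed by a single filter returning only the selected group.
import Mathlib
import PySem

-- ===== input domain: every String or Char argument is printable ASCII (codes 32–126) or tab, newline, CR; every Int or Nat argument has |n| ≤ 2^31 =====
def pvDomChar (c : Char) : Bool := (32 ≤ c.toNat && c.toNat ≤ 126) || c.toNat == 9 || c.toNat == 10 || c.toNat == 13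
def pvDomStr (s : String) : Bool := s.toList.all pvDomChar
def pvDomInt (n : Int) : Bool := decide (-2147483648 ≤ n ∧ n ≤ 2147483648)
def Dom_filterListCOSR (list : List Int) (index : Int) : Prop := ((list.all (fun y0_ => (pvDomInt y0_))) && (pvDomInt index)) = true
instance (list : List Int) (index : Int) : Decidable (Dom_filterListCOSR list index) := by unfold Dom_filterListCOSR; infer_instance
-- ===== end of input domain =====

-- B replaces A's simultaneous two-list partition by a count pass deciding the target
-- bit value, then a single filter; equivalence proved on Pre_ (nonnegative index or
-- singleton list, since 1 << index raises ValueError for negative index otherwise).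

-- ===== PORT A =====
def filterListCOSR (list : List Int) (index : Int) : List Int :=
  if list.length == 1 then list
  else
    -- 1 << index: index < 0 raises in Python; excluded by Pre_ (index.toNat only read for 0 ≤ index)
    let mask : Int := ((1 <<< index.toNat : Nat) : Int)
    let p := list.foldl (fun (p : List Int × List Int) pos =>
      let bit := PySem.Int.band pos mask
      if bit == 0 then (p.1 ++ [pos], p.2) else (p.1, p.2 ++ [pos])) ([], [])
    if p.2.length < p.1.length then p.2 else p.1

-- ===== PORT B =====
def filterListCOSR_alt (list : List Int) (index : Int) : List Int :=
  if list.length ≤ 1 then list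
  else
    let mask : Int := ((1 <<< index.toNat : Nat) : Int)
    let ones := (list.map (fun pos => if PySem.Int.band pos mask ≠ 0 then (1:Int) else 0)).sum
    let targetOne : Bool := decide (2 * ones < (list.length : Int))
    list.filter (fun pos => (!(PySem.Int.band pos mask == 0)) == targetOne)

-- ===== PRECONDITION & SPEC =====
-- Pre_ excludes exactly the inputs where A raises ValueError: negative shift count
-- when len(list) ≥ 2 (the length-1 early return never computes the shift, and on the
-- empty list the loop body never runs, so A returns [] there for any index).
def Pre_filterListCOSR (list : List Int) (index : Int) : Prop := list.length ≤ 1 ∨ 0 ≤ index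
instance (list : List Int) (index : Int) : Decidable (Pre_filterListCOSR list index) := by unfold Pre_filterListCOSR; infer_instance
def pvWitness_filterListCOSR : List Int × Int := ([5, 2, 7], 1)
def Spec_filterListCOSR (list : List Int) (index : Int) (out : List Int) : Prop := out = filterListCOSR_alt list index
instance (list : List Int) (index : Int) (out : List Int) : Decidable (Spec_filterListCOSR list index out) := by unfold Spec_filterListCOSR; infer_instance

-- ===== CLAIM (what is proved, stated in full; the proofs are below) =====
def Claim_equal_filterListCOSR : Prop := ∀ (list : List Int) (index : Int), Dom_filterListCOSR list index → Pre_filterListCOSR list index → Spec_filterListCOSR list index (filterListCOSR list index)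

-- ===== LEMMAS AND PROOFS =====

-- A's loop builds exactly the two filter lists.
theorem foldl_partition (mask : Int) (l : List Int) (a b : List Int) :
    l.foldl (fun (p : List Int × List Int) pos =>
      let bit := PySem.Int.band pos mask
      if bit == 0 then (p.1 ++ [pos], p.2) else (p.1, p.2 ++ [pos])) (a, b)
    = (a ++ l.filter (fun pos => PySem.Int.band pos mask == 0),
       b ++ l.filter (fun pos => !(PySem.Int.band pos mask == 0))) := by
  induction l generalizing a b with
  | nil => simp
  | cons x xs ih =>
    by_cases h : PySem.Int.band x mask = 0
    · have hb : (PySem.Int.band x mask == 0) = true := by simp [h]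
      simp only [List.foldl_cons, hb, if_true]
      rw [ih]
      simp [h]
    · have hb : (PySem.Int.band x mask == 0) = false := by simp [h]
      simp only [List.foldl_cons, hb, Bool.false_eq_true, if_false]
      rw [ih]
      simp [h]

-- B's 0/1-sum is the count of one-bits.
theorem ones_eq_countP (mask : Int) (l : List Int) :
    (l.map (fun pos => if PySem.Int.band pos mask ≠ 0 then (1:Int) else 0)).sum
    = (l.countP (fun pos => !(PySem.Int.band pos mask == 0)) : Int) := by
  induction l with
  | nil => simp
  | cons x xs ih =>
    rw [List.map_cons, List.sum_cons, ih, List.countP_cons]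
    by_cases h : PySem.Int.band x mask = 0
    · simp [h]
    · simp [h]; ring

-- ===== VERDICT (by name: the statement is the Claim_ definition above) =====
theorem filterListCOSR_spec : Claim_equal_filterListCOSR := by
  intro list index _ _
  unfold Spec_filterListCOSR filterListCOSR filterListCOSR_alt
  by_cases h1 : list.length == 1
  · simp [h1, Nat.le_of_eq (by simpa using h1)]
  · by_cases hnil : list = []
    · subst hnil; simp
    · have h2 : ¬ list.length ≤ 1 := by
        rcases list with _ | ⟨a, _ | ⟨b, t⟩⟩ <;> simp_all
      simp only [h1, h2, Bool.false_eq_true, if_false]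
      rw [foldl_partition, ones_eq_countP]
      simp only [List.nil_append]
      rw [← List.countP_eq_length_filter, ← List.countP_eq_length_filter]
      have hsum : list.length = list.countP (fun pos => !(PySem.Int.band pos ((1 <<< index.toNat : Nat) : Int) == 0))
          + list.countP (fun pos => (PySem.Int.band pos ((1 <<< index.toNat : Nat) : Int) == 0)) := by
        rw [List.length_eq_countP_add_countP
          (fun pos => !(PySem.Int.band pos ((1 <<< index.toNat : Nat) : Int) == 0)) (l := list)]
        congr 1
        apply List.countP_congr
        intro a _
        simp
      set co := list.countP (fun pos => !(PySem.Int.band pos ((1 <<< index.toNat : Nat) : Int) == 0)) with hco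
      set cz := list.countP (fun pos => (PySem.Int.band pos ((1 <<< index.toNat : Nat) : Int) == 0)) with hcz
      by_cases hlt : co < cz
      · have ht : decide (2 * (co : Int) < (list.length : Int)) = true := by
          simp only [decide_eq_true_iff]; omega
        simp only [hlt, if_true, ht]
        simp
      · have ht : decide (2 * (co : Int) < (list.length : Int)) = false := by
          simp only [decide_eq_false_iff_not, not_lt]; omega
        simp only [hlt, if_false, ht]
        simp
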